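-- pv_equiv track=rewrite | github.com/bryanb619/Fundamentos | ExerciciosDiogo/Conjuntos/conjunto.py | encontrar_palavras_unicas
-- ===== SOURCE A (Python) =====
-- unwanted_chars = [".", ",", "!", "?"]
--
-- def encontrar_palavras_unicas(frases_a_analisar):
--
--     #cria um conjunto vazio, se não fizermos isso, Python vai criar um dicionário
--     my_set = set()
--
--     # junta todas as frases numa string e fazemos lowercase de tudo
--     my_sting = "".join(frases_a_analisar).lower()
--
--     # para cada caracter indesejado, substitui por um espaço
--     for char in unwanted_chars:
--         my_sting = my_sting.replace(char, " ")
--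
--     # divide a string e converte-a novamente numa lista de palavras
--     my_sting = my_sting.split()
--
--     # para cada palavra na lista, se a palavra aparecer apenas uma vez, adiciona-a ao conjunto
--     for word in my_sting:
--         # se o count for igual a 1, adiciona a palavra ao conjunto
--         if word.count(word) == 1:
--             # adiciona a palavra ao conjunto
--             my_set.add(word)
--
--     # retorna o conjunto
--     return my_set
-- ===== SOURCE B (Python) =====
-- def encontrar_palavras_unicas(frases_a_analisar):
--     # single pass: scan the joined lowercased text once, collecting maximal
--     # runs of characters that are neither whitespace nor one of . , ! ?
--     tokens = []
--     word = []
--     for ch in "".join(frases_a_analisar).lower():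
--         if ch in ".,!?" or ch.isspace():
--             if word:
--                 tokens.append("".join(word))
--                 word = []
--         else:
--             word.append(ch)
--     if word:
--         tokens.append("".join(word))
--     return set(tokens)
-- ===== Notes on version B (the rewrite author's own statement) =====
-- stated objective: alternative
-- what changed: B replaces A's four full-string replace passes plus split plus per-word count test by one single character scan that collects maximal runs of non-separator characters into tokens and returns their set.
import Mathlib
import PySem

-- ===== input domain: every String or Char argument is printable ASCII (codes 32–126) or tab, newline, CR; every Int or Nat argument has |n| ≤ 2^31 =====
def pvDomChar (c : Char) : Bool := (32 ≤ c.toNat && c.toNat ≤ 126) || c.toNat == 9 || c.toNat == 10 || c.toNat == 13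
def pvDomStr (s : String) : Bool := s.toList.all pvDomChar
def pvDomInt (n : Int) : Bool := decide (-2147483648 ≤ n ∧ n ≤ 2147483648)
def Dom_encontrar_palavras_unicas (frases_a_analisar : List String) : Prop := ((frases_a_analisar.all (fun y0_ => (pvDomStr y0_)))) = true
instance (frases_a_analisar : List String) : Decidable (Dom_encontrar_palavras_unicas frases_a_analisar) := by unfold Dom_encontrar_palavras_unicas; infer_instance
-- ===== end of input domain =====

-- B makes one scan over the joined lowercased text collecting maximal runs of
-- non-separator characters, instead of A's four replace passes + split + count test.

-- ===== PORT A =====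
def unwanted_chars : List String := [".", ",", "!", "?"]

def encontrar_palavras_unicas (frases_a_analisar : List String) : List String :=
  let my_set : PySem.Set String := PySem.Set.empty
  let my_sting := PySem.Str.lower (PySem.Str.join "" frases_a_analisar)
  let my_sting := unwanted_chars.foldl (fun s ch => PySem.Str.replace s ch " ") my_sting
  let words := PySem.Str.split₀ my_sting
  words.foldl (fun st w => if PySem.Str.count w w == 1 then PySem.Set.add st w else st) my_set

-- ===== PORT B =====
def pvSepB (c : Char) : Bool :=
  c == '.' || c == ',' || c == '!' || c == '?' || PySem.Chars.isspace c

def pvStepB (st : List String × List Char) (ch : Char) : List String × List Char :=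
  if pvSepB ch then
    (if st.2.isEmpty then st else (st.1 ++ [String.ofList st.2], []))
  else (st.1, st.2 ++ [ch])

def encontrar_palavras_unicas_alt (frases_a_analisar : List String) : List String :=
  let text := PySem.Str.lower (PySem.Str.join "" frases_a_analisar)
  let st := text.toList.foldl pvStepB ([], [])
  let tokens := if st.2.isEmpty then st.1 else st.1 ++ [String.ofList st.2]
  PySem.Set.ofList tokens

-- ===== PRECONDITION & SPEC =====
def Spec_encontrar_palavras_unicas (frases_a_analisar : List String) (out : List String) : Prop := out = encontrar_palavras_unicas_alt frases_a_analisar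
instance (frases_a_analisar : List String) (out : List String) : Decidable (Spec_encontrar_palavras_unicas frases_a_analisar out) := by unfold Spec_encontrar_palavras_unicas; infer_instance

-- ===== CLAIM (what is proved, stated in full; the proofs are below) =====
def Claim_equal_encontrar_palavras_unicas : Prop := ∀ (frases_a_analisar : List String), Dom_encontrar_palavras_unicas frases_a_analisar → Spec_encontrar_palavras_unicas frases_a_analisar (encontrar_palavras_unicas frases_a_analisar)

-- ===== LEMMAS AND PROOFS =====

-- reference tokenizer: maximal runs of characters with p = false, current run in `cur`
def pvToksP (p : Char → Bool) : List Char → List Char → List (List Char)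
  | [], cur => if cur.isEmpty then [] else [cur]
  | c :: rest, cur =>
      if p c then (if cur.isEmpty then pvToksP p rest [] else cur :: pvToksP p rest [])
      else pvToksP p rest (cur ++ [c])

-- the effect of a single-char replace by a space
def pvSubst (a : Char) (x : Char) : Char := if x = a then ' ' else x

theorem pv_replace_go_single (a : Char) :
    ∀ (l : List Char) (fuel : Nat) (acc : List Char), l.length ≤ fuel →
      PySem.Chars.replace.go [a] [' '] fuel l acc
        = acc.reverse ++ l.map (pvSubst a) := by
  intro l
  induction l with
  | nil =>
      intro fuel acc _
      cases fuel <;> simp [PySem.Chars.replace.go]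
  | cons c t ih =>
      intro fuel acc h
      cases fuel with
      | zero => simp at h
      | succ n =>
          by_cases hc : c = a
          · subst hc
            have hp : [c].isPrefixOf (c :: t) = true := by simp [List.isPrefixOf]
            have step : PySem.Chars.replace.go [c] [' '] (n+1) (c :: t) acc
                = PySem.Chars.replace.go [c] [' '] n t (' ' :: acc) := by
              simp [PySem.Chars.replace.go, hp]
            rw [step, ih n (' ' :: acc) (by simpa using h)]
            simp [pvSubst]
          · have hp : [a].isPrefixOf (c :: t) = false := by
              simp [List.isPrefixOf]
              exact fun h' => absurd h'.symm hc
            have step : PySem.Chars.replace.go [a] [' '] (n+1) (c :: t) acc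
                = PySem.Chars.replace.go [a] [' '] n t (c :: acc) := by
              simp [PySem.Chars.replace.go, hp]
            rw [step, ih n (c :: acc) (by simpa using Nat.le_of_succ_le_succ h)]
            simp [pvSubst, hc]

theorem pv_replace_single (a : Char) (cs : List Char) :
    PySem.Chars.replace cs [a] [' '] = cs.map (pvSubst a) := by
  simp [PySem.Chars.replace, pv_replace_go_single a cs cs.length [] le_rfl]

def pvG (x : Char) : Char := pvSubst '?' (pvSubst '!' (pvSubst ',' (pvSubst '.' x)))

theorem pv_isspace_pvG (c : Char) : PySem.Chars.isspace (pvG c) = pvSepB c := by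
  by_cases h1 : c = '.'
  · subst h1; decide
  by_cases h2 : c = ','
  · subst h2; decide
  by_cases h3 : c = '!'
  · subst h3; decide
  by_cases h4 : c = '?'
  · subst h4; decide
  simp [pvG, pvSubst, h1, h2, h3, h4, pvSepB]

theorem pv_pvG_of_not_sep (c : Char) (h : pvSepB c = false) : pvG c = c := by
  simp [pvSepB] at h
  obtain ⟨⟨⟨⟨h1, h2⟩, h3⟩, h4⟩, _⟩ := h
  simp [pvG, pvSubst, h1, h2, h3, h4]

-- split₀.go in terms of pvToksP with the isspace predicate
theorem pv_split₀_go_eq :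
    ∀ (l : List Char) (cur : List Char) (acc : List (List Char)),
      PySem.Chars.split₀.go l cur acc
        = acc.reverse ++ pvToksP PySem.Chars.isspace l cur.reverse := by
  intro l
  induction l with
  | nil =>
      intro cur acc
      by_cases h : cur.isEmpty <;> simp_all [PySem.Chars.split₀.go, pvToksP]
  | cons c rest ih =>
      intro cur acc
      by_cases hs : PySem.Chars.isspace c
      · by_cases hc : cur.isEmpty
        · have : cur = [] := by simpa [List.isEmpty_iff] using hc
          subst this
          simp [PySem.Chars.split₀.go, hs, ih, pvToksP]
        · have hne : cur.reverse.isEmpty = false := by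
            simp [List.isEmpty_iff] at hc ⊢; exact hc
          simp [PySem.Chars.split₀.go, hs, hc, ih, pvToksP, hne]
      · simp [PySem.Chars.split₀.go, hs, ih, pvToksP]

theorem pv_toks_map_g :
    ∀ (cs cur : List Char),
      pvToksP PySem.Chars.isspace (cs.map pvG) cur = pvToksP pvSepB cs cur := by
  intro cs
  induction cs with
  | nil => intro cur; simp [pvToksP]
  | cons c rest ih =>
      intro cur
      by_cases hs : pvSepB c
      · simp [pvToksP, pv_isspace_pvG, hs, ih]
      · have h' : pvSepB c = false := by simpa using hs
        have hss : PySem.Chars.isspace c = false := by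
          simp [pvSepB] at h'; exact h'.2
        simp [pvToksP, hs, hss, ih, pv_pvG_of_not_sep c h']

-- B's fold in terms of pvToksP
def pvFlush (st : List String × List Char) : List String :=
  if st.2.isEmpty then st.1 else st.1 ++ [String.ofList st.2]

theorem pv_fold_b :
    ∀ (cs : List Char) (ts : List String) (w : List Char),
      pvFlush (cs.foldl pvStepB (ts, w))
        = ts ++ (pvToksP pvSepB cs w).map String.ofList := by
  intro cs
  induction cs with
  | nil =>
      intro ts w
      by_cases h : w.isEmpty <;> simp [pvFlush, pvToksP, h]
  | cons c rest ih =>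
      intro ts w
      by_cases hs : pvSepB c
      · by_cases hw : w.isEmpty
        · have : w = [] := by simpa [List.isEmpty_iff] using hw
          subst this
          simp [pvStepB, hs, ih, pvToksP]
        · simp [pvStepB, hs, hw, ih, pvToksP]
      · simp [pvStepB, hs, ih, pvToksP]

-- every token produced by the tokenizer is nonempty
theorem pv_toks_ne_nil (p : Char → Bool) :
    ∀ (cs cur t : List Char), t ∈ pvToksP p cs cur → t ≠ [] := by
  intro cs
  induction cs with
  | nil =>
      intro cur t ht
      by_cases h : cur.isEmpty
      · simp [pvToksP, h] at ht
      · simp [pvToksP, h] at ht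
        subst ht
        simpa [List.isEmpty_iff] using h
  | cons c rest ih =>
      intro cur t ht
      by_cases hs : p c
      · by_cases hc : cur.isEmpty
        · simp [pvToksP, hs, hc] at ht; exact ih [] t ht
        · simp [pvToksP, hs, hc] at ht
          rcases ht with h | h
          · subst h; simpa [List.isEmpty_iff] using hc
          · exact ih [] t h
      · simp [pvToksP, hs] at ht
        exact ih (cur ++ [c]) t ht

theorem pv_count_go_nil (sub : List Char) (f : Nat) (acc : Nat) :
    PySem.Chars.count.go sub f [] acc = acc := by
  cases f <;> simp [PySem.Chars.count.go]

theorem pv_count_self (cs : List Char) (h : cs ≠ []) : PySem.Chars.count cs cs = 1 := by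
  cases cs with
  | nil => exact absurd rfl h
  | cons c t =>
      have hp : (c :: t).isPrefixOf (c :: t) = true := by
        simp [List.isPrefixOf_iff_prefix]
      have step : PySem.Chars.count.go (c :: t) (t.length + 1) (c :: t) 0
          = PySem.Chars.count.go (c :: t) t.length (List.drop (c :: t).length (c :: t)) 1 := by
        simp [PySem.Chars.count.go, hp]
      simp only [PySem.Chars.count, List.isEmpty_cons, Bool.false_eq_true, if_false,
        List.length_cons]
      rw [step, List.drop_of_length_le (by simp)]
      exact pv_count_go_nil _ _ _

-- A's filtering fold is just Set.ofList on these nonempty words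
theorem pv_fold_a (ws : List String) (h : ∀ w ∈ ws, (PySem.Str.count w w == 1) = true) :
    ws.foldl (fun st w => if PySem.Str.count w w == 1 then PySem.Set.add st w else st)
        PySem.Set.empty = PySem.Set.ofList ws := by
  rw [PySem.Set.ofList_eq_foldl]
  refine PySem.List.foldl_congr_mem ws _ _ _ (fun acc w hw => ?_)
  have hc := h w hw
  simp [PySem.Str.count] at hc
  simp [hc]

-- the words A computes, as the tokenizer over the original characters
theorem pv_words_eq (cs : List Char) :
    PySem.Chars.split₀ (cs.map pvG) = pvToksP pvSepB cs [] := by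
  rw [PySem.Chars.split₀, pv_split₀_go_eq]
  simpa using pv_toks_map_g cs []

-- ===== VERDICT (by name: the statement is the Claim_ definition above) =====
theorem encontrar_palavras_unicas_spec : Claim_equal_encontrar_palavras_unicas := by
  intro frases _
  unfold Spec_encontrar_palavras_unicas
  simp only [encontrar_palavras_unicas, encontrar_palavras_unicas_alt]
  set cs := (PySem.Str.lower (PySem.Str.join "" frases)).toList with hcs
  have rstep : ∀ (a : Char) (s : String), PySem.Str.replace s (String.ofList [a]) " "
      = String.ofList (s.toList.map (pvSubst a)) := by
    intro a s
    simp only [PySem.Str.replace, String.toList_ofList]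
    rw [show (" ":String).toList = [' '] from rfl, pv_replace_single]
  have hreplace : unwanted_chars.foldl (fun s ch => PySem.Str.replace s ch " ")
      (PySem.Str.lower (PySem.Str.join "" frases))
      = String.ofList (cs.map pvG) := by
    have e1 : (".":String) = String.ofList ['.'] := rfl
    have e2 : (",":String) = String.ofList [','] := rfl
    have e3 : ("!":String) = String.ofList ['!'] := rfl
    have e4 : ("?":String) = String.ofList ['?'] := rfl
    simp only [unwanted_chars, List.foldl]
    rw [e1, e2, e3, e4, rstep, rstep, rstep, rstep]
    simp only [String.toList_ofList, List.map_map]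
    rw [← hcs]
    exact congrArg String.ofList (List.map_congr_left (fun x _ => rfl))
  have hwords : PySem.Str.split₀ (unwanted_chars.foldl (fun s ch => PySem.Str.replace s ch " ")
      (PySem.Str.lower (PySem.Str.join "" frases)))
      = (pvToksP pvSepB cs []).map String.ofList := by
    rw [hreplace]
    simp only [PySem.Str.split₀, String.toList_ofList]
    rw [pv_words_eq]
  rw [hwords]
  rw [pv_fold_a _ (by
    intro w hw
    simp only [List.mem_map] at hw
    obtain ⟨t, ht, rfl⟩ := hw
    have hne := pv_toks_ne_nil pvSepB cs [] t ht
    simp [PySem.Str.count, pv_count_self _ (by simpa using hne)])]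
  have hb := pv_fold_b cs [] []
  simp only [pvFlush] at hb
  rw [hb]
  simp only [List.nil_append]
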